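-- pv_equiv track=rewrite | github.com/Computational-TDMS/TDEaseNext | app/services/prsm_bundle_builder.py | _detect_prsm_header
-- ===== SOURCE A (Python) =====
-- from typing import Any, Dict, List, Optional, Tuple
--
-- def _detect_prsm_header(lines: List[str]) -> Tuple[int, List[str]]:
--     for idx, raw in enumerate(lines):
--         stripped = raw.strip()
--         if not stripped:
--             continue
--         if "\t" not in stripped:
--             continue
--         columns = [part.strip() for part in stripped.split("\t")]
--         if "Prsm ID" in columns:
--             return idx, columns
--     for idx, raw in enumerate(lines):
--         stripped = raw.strip()
--         if not stripped or stripped.startswith("*") or stripped.startswith("#"):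
--             continue
--         if "\t" not in stripped:
--             continue
--         columns = [part.strip() for part in stripped.split("\t")]
--         if len([c for c in columns if c]) < 2:
--             continue
--         if any(col.endswith(":") for col in columns if col):
--             continue
--         return idx, columns
--     raise ValueError("Unable to detect TopPIC PrSM header row")
-- ===== SOURCE B (Python) =====
-- from typing import List, Tuple
--
-- def _detect_prsm_header(lines: List[str]) -> Tuple[int, List[str]]:
--     fallback = None
--     for idx, raw in enumerate(lines):
--         stripped = raw.strip()
--         if "\t" not in stripped:
--             continue
--         columns = [part.strip() for part in stripped.split("\t")]
--         if "Prsm ID" in columns: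
--             return idx, columns
--         if fallback is None and not stripped.startswith(("*", "#")):
--             nonempty = [c for c in columns if c]
--             if len(nonempty) >= 2 and not any(c.endswith(":") for c in nonempty):
--                 fallback = (idx, columns)
--     if fallback is not None:
--         return fallback
--     raise ValueError("Unable to detect TopPIC PrSM header row")
-- ===== Notes on version B (the rewrite author's own statement) =====
-- stated objective: alternative
-- what changed: The two sequential scans (header scan, then fallback scan) are merged into one pass over the lines that returns eagerly on a 'Prsm ID' line and remembers the first fallback candidate otherwise.
import Mathlib
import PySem

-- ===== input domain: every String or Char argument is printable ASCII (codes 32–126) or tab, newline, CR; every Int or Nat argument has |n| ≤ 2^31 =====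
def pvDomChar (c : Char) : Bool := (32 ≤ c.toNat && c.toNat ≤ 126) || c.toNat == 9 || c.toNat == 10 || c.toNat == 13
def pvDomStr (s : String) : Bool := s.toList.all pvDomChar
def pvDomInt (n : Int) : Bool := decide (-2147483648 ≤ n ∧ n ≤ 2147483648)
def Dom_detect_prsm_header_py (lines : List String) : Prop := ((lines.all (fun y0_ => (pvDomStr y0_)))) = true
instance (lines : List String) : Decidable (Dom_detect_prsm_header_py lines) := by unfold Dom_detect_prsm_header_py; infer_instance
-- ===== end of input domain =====

-- B merges A's two sequential scans into a single pass that remembers the first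
-- fallback candidate; equivalence of the return values is proved (A raises where
-- no line qualifies; those inputs are excluded by Pre_).

-- shared per-line helper: [part.strip() for part in stripped.split("\t")]
def pvCols (stripped : String) : List String :=
  ((PySem.Str.split? stripped "\t").getD []).map PySem.Str.strip  -- split? is `some` since "\t" ≠ ""

-- ===== PORT A =====
-- first loop of A: look for a tab-separated line whose columns contain "Prsm ID"
def pvScanHeader : List (Int × String) → Option (Int × List String)
  | [] => none
  | (idx, raw) :: rest =>
    let stripped := PySem.Str.strip raw
    if stripped = "" then pvScanHeader rest
    else if !(PySem.Str.isIn "\t" stripped) then pvScanHeader rest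
    else
      let columns := pvCols stripped
      if columns.contains "Prsm ID" then some (idx, columns)
      else pvScanHeader rest

-- second loop of A: first plausible data/header line
def pvScanFallback : List (Int × String) → Option (Int × List String)
  | [] => none
  | (idx, raw) :: rest =>
    let stripped := PySem.Str.strip raw
    if stripped = "" || PySem.Str.startswith stripped "*" || PySem.Str.startswith stripped "#" then
      pvScanFallback rest
    else if !(PySem.Str.isIn "\t" stripped) then pvScanFallback rest
    else
      let columns := pvCols stripped
      if (columns.filter (fun c => !(c == ""))).length < 2 then pvScanFallback rest
      else if columns.any (fun c => !(c == "") && PySem.Str.endswith c ":") then pvScanFallback rest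
      else some (idx, columns)

def detect_prsm_header_py (lines : List String) : Int × List String :=
  match pvScanHeader (PySem.List.enumerate lines 0) with
  | some r => r
  | none =>
    match pvScanFallback (PySem.List.enumerate lines 0) with
    | some r => r
    | none => (-1, [])   -- Python raises ValueError here; excluded by Pre_

-- ===== PORT B =====
-- single pass: return eagerly on a "Prsm ID" line, remember the first fallback candidate
def pvScanOne : List (Int × String) → Option (Int × List String) → Option (Int × List String)
  | [], fallback => fallback
  | (idx, raw) :: rest, fallback =>
    let stripped := PySem.Str.strip raw
    if !(PySem.Str.isIn "\t" stripped) then pvScanOne rest fallback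
    else
      let columns := pvCols stripped
      if columns.contains "Prsm ID" then some (idx, columns)
      else
        let nonempty := columns.filter (fun c => !(c == ""))
        let fallback' :=
          if fallback.isNone && !(PySem.Str.startswith stripped "*")
              && !(PySem.Str.startswith stripped "#")
              && decide (2 ≤ nonempty.length)
              && !(nonempty.any (fun c => PySem.Str.endswith c ":"))
          then some (idx, columns) else fallback
        pvScanOne rest fallback'

def detect_prsm_header_py_alt (lines : List String) : Int × List String :=
  match pvScanOne (PySem.List.enumerate lines 0) none with
  | some r => r
  | none => (-1, [])   -- Python raises ValueError here; excluded by Pre_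

-- ===== PRECONDITION & SPEC =====
-- a line A's first loop accepts
def pvHeaderLine (raw : String) : Bool :=
  PySem.Str.isIn "\t" (PySem.Str.strip raw)
    && (pvCols (PySem.Str.strip raw)).contains "Prsm ID"

-- a line A's second loop accepts
def pvFallbackLine (raw : String) : Bool :=
  let s := PySem.Str.strip raw
  PySem.Str.isIn "\t" s
    && !(PySem.Str.startswith s "*") && !(PySem.Str.startswith s "#")
    && decide (2 ≤ ((pvCols s).filter (fun c => !(c == ""))).length)
    && !((pvCols s).any (fun c => !(c == "") && PySem.Str.endswith c ":"))

-- Pre_ excludes exactly the inputs with no qualifying line, on which A raises ValueError.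
def Pre_detect_prsm_header_py (lines : List String) : Prop :=
  lines.any (fun raw => pvHeaderLine raw || pvFallbackLine raw) = true
instance (lines : List String) : Decidable (Pre_detect_prsm_header_py lines) := by
  unfold Pre_detect_prsm_header_py; infer_instance

def pvWitness_detect_prsm_header_py : List String := ["Prsm ID\tSpectrum ID"]

def Spec_detect_prsm_header_py (lines : List String) (out : Int × List String) : Prop :=
  out = detect_prsm_header_py_alt lines
instance (lines : List String) (out : Int × List String) : Decidable (Spec_detect_prsm_header_py lines out) := by
  unfold Spec_detect_prsm_header_py; infer_instance

-- ===== CLAIM (what is proved, stated in full; the proofs are below) =====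
def Claim_equal_detect_prsm_header_py : Prop :=
  ∀ (lines : List String), Dom_detect_prsm_header_py lines →
    Pre_detect_prsm_header_py lines →
    Spec_detect_prsm_header_py lines (detect_prsm_header_py lines)

-- ===== LEMMAS AND PROOFS =====

-- the one-pass scan equals "header scan, else stored fallback, else fallback scan"
lemma pvScanOne_eq (l : List (Int × String)) (fb : Option (Int × List String)) :
    pvScanOne l fb =
      match pvScanHeader l with
      | some r => some r
      | none => fb.or (pvScanFallback l) := by
  induction l generalizing fb with
  | nil => cases fb <;> simp [pvScanOne, pvScanHeader, pvScanFallback]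
  | cons p rest ih =>
    obtain ⟨idx, raw⟩ := p
    by_cases ht : PySem.Chars.isIn ['\t'] (PySem.Chars.strip raw.toList) = true
    · have hs : ¬ (PySem.Str.strip raw = "") := by
        intro h
        have h' : PySem.Chars.strip raw.toList = [] := by
          have := congrArg String.toList h
          simpa using this
        rw [h'] at ht
        exact absurd ht (by decide)
      by_cases hp : "Prsm ID" ∈ pvCols (PySem.Str.strip raw)
      · simp [pvScanOne, pvScanHeader, ht, hs, hp]
      · by_cases h1 : PySem.Chars.startswith (PySem.Chars.strip raw.toList) ['*'] = true
        · cases fb <;> simp [pvScanOne, pvScanHeader, pvScanFallback, ht, hs, hp, h1, ih]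
        · by_cases h2 : PySem.Chars.startswith (PySem.Chars.strip raw.toList) ['#'] = true
          · cases fb <;> simp [pvScanOne, pvScanHeader, pvScanFallback, ht, hs, hp, h1, h2, ih]
          · by_cases h3 : 2 ≤ ((pvCols (PySem.Str.strip raw)).filter (fun c => !(c == ""))).length
            · have h3' : ¬ ((pvCols (PySem.Str.strip raw)).filter (fun c => !(c == ""))).length ≤ 1 := by
                omega
              by_cases h4 : ∃ x ∈ pvCols (PySem.Str.strip raw), ¬ x = "" ∧ PySem.Chars.endswith x.toList [':'] = true
              · have h4' : ¬ ∀ x ∈ pvCols (PySem.Str.strip raw), ¬ x = "" → PySem.Chars.endswith x.toList [':'] = false := by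
                  push Not
                  obtain ⟨x, hx, hne, he⟩ := h4
                  exact ⟨x, hx, hne, by simp [he]⟩
                cases fb <;>
                  simp [pvScanOne, pvScanHeader, pvScanFallback, ht, hs, hp, h1, h2, h3, h3', h4, h4', ih]
              · have h4' : ∀ x ∈ pvCols (PySem.Str.strip raw), ¬ x = "" → PySem.Chars.endswith x.toList [':'] = false := by
                  intro x hx hne
                  by_contra hc
                  exact h4 ⟨x, hx, hne, by simpa using hc⟩
                cases fb with
                | some v =>
                  simp [pvScanOne, pvScanHeader, pvScanFallback, ht, hs, hp, h1, h2, h3, h3', h4, ih]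
                | none =>
                  simp [pvScanOne, pvScanHeader, pvScanFallback, ht, hs, hp, h1, h2, h3, h3', h4, ih]
                  rw [if_pos h4']
                  cases pvScanHeader rest <;> simp
            · have h3' : ((pvCols (PySem.Str.strip raw)).filter (fun c => !(c == ""))).length ≤ 1 := by
                omega
              cases fb <;> simp [pvScanOne, pvScanHeader, pvScanFallback, ht, hs, hp, h1, h2, h3, h3', ih]
    · have hA : pvScanHeader ((idx, raw) :: rest) = pvScanHeader rest := by
        by_cases hs : PySem.Str.strip raw = "" <;> simp [pvScanHeader, hs, ht]
      have hB : pvScanFallback ((idx, raw) :: rest) = pvScanFallback rest := by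
        by_cases hs : PySem.Str.strip raw = "" <;>
          by_cases h1 : PySem.Chars.startswith (PySem.Chars.strip raw.toList) ['*'] = true <;>
          by_cases h2 : PySem.Chars.startswith (PySem.Chars.strip raw.toList) ['#'] = true <;>
          simp [pvScanFallback, hs, h1, h2, ht]
      simp only [pvScanOne]
      rw [hA, hB]
      simp only [PySem.Str.isIn_eq]
      simp [ht, ih]

-- ===== VERDICT (by name: the statement is the Claim_ definition above) =====
theorem detect_prsm_header_py_spec : Claim_equal_detect_prsm_header_py := by
  unfold Claim_equal_detect_prsm_header_py
  intro lines _ _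
  unfold Spec_detect_prsm_header_py detect_prsm_header_py detect_prsm_header_py_alt
  rw [pvScanOne_eq]
  cases pvScanHeader (PySem.List.enumerate lines 0) <;>
    cases pvScanFallback (PySem.List.enumerate lines 0) <;> simp
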